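-- pv_equiv track=rewrite | github.com/luupanu/juggling | siteswap/_helpers/_helper_functions.py | _balls_dont_collide
-- ===== SOURCE A (Python) =====
-- def _balls_dont_collide(sequence: list[int]) -> bool:
--     period = len(sequence)
--     taken = [False] * period
--
--     for i, x in enumerate(sequence):
--         check = (x+i) % period
--         if taken[check]:
--             return False
--         taken[check] = True
--     return True
-- ===== SOURCE B (Python) =====
-- def _balls_dont_collide(sequence: list[int]) -> bool:
--     period = len(sequence)
--     positions = sorted((x + i) % period for i, x in enumerate(sequence))
--     for j in range(1, len(positions)):
--         if positions[j-1] == positions[j]: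
--             return False
--     return True
-- ===== Notes on version B (the rewrite author's own statement) =====
-- stated objective: alternative
-- what changed: Replaces the incremental seen-array pass (boolean table indexed by landing position, early exit on a repeat) by building the list of landing positions, sorting it, and scanning adjacent pairs for a duplicate.
import Mathlib
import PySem

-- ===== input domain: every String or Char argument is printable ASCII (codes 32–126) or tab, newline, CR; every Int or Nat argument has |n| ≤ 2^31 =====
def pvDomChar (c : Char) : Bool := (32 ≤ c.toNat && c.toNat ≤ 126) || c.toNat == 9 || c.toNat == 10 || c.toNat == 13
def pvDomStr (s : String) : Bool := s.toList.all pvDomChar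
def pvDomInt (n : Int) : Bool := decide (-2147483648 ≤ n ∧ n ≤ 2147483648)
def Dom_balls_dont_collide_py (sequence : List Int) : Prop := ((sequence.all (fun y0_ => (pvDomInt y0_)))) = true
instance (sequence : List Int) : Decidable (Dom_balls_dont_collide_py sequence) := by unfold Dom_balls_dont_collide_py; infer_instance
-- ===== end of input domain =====

-- B replaces A's incremental seen-array pass by sort-then-adjacent-scan over the landing positions (alternative algorithm, same results).

-- ===== PORT A =====
-- the for-loop of A: early return False on a taken slot, else mark the slot and continue
def pvLoopA (period : Int) : List (Int × Int) → List Bool → Bool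
  | [], _ => true
  | (i, x) :: rest, taken =>
    let check := PySem.Int.mod (x + i) period
    match PySem.List.pyGet? taken check with
    | none => false   -- IndexError; unreachable: 0 ≤ check < period = taken.length
    | some b =>
      if b then false
      else pvLoopA period rest (PySem.List.pySetD taken check true)

def balls_dont_collide_py (sequence : List Int) : Bool :=
  let period : Int := sequence.length
  let taken : List Bool := List.replicate sequence.length false
  pvLoopA period (PySem.List.enumerate sequence 0) taken

-- ===== PORT B =====
-- the scan over adjacent pairs of the sorted positions list
def pvAdjDistinct : List Int → Bool
  | [] => true
  | [_] => true
  | a :: b :: t => if a == b then false else pvAdjDistinct (b :: t)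

def balls_dont_collide_py_alt (sequence : List Int) : Bool :=
  let period : Int := sequence.length
  let positions := (PySem.List.enumerate sequence 0).map (fun p => PySem.Int.mod (p.2 + p.1) period)
  pvAdjDistinct (PySem.List.sorted positions (fun x => x) false)

-- ===== PRECONDITION & SPEC =====
def Spec_balls_dont_collide_py (sequence : List Int) (out : Bool) : Prop := out = balls_dont_collide_py_alt sequence
instance (sequence : List Int) (out : Bool) : Decidable (Spec_balls_dont_collide_py sequence out) := by unfold Spec_balls_dont_collide_py; infer_instance

-- ===== CLAIM (what is proved, stated in full; the proofs are below) =====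
def Claim_equal_balls_dont_collide_py : Prop := ∀ (sequence : List Int), Dom_balls_dont_collide_py sequence → Spec_balls_dont_collide_py sequence (balls_dont_collide_py sequence)

-- ===== LEMMAS AND PROOFS =====

-- B side: on a weakly increasing list the adjacent scan accepts exactly the duplicate-free lists
theorem pvAdjDistinct_sorted_iff (l : List Int) (hs : l.Pairwise (· ≤ ·)) :
    pvAdjDistinct l = true ↔ l.Nodup := by
  induction l with
  | nil => simp [pvAdjDistinct]
  | cons a t ih =>
    cases t with
    | nil => simp [pvAdjDistinct]
    | cons b u =>
      rw [List.pairwise_cons] at hs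
      by_cases h : a = b
      · subst h
        simp [pvAdjDistinct]
      · have hab : a < b := lt_of_le_of_ne (hs.1 b (by simp)) h
        have hnotin : a ∉ b :: u := by
          intro hmem
          have hle : b ≤ a := by
            rcases List.mem_cons.mp hmem with h' | hmem'
            · omega
            · exact (List.pairwise_cons.mp hs.2).1 a hmem'
          omega
        simp only [pvAdjDistinct, beq_iff_eq, if_neg h, ih hs.2, List.nodup_cons]
        tauto

theorem nodup_of_chain_sorted {l : List Int}
    (h : pvAdjDistinct (PySem.List.sorted l (fun x => x) false) = true) : l.Nodup := by
  have := (pvAdjDistinct_sorted_iff _ (PySem.List.sorted_pairwise l (fun x => x))).mp h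
  exact (List.Perm.nodup_iff (PySem.List.sorted_perm l (fun x => x) false)).mp this

theorem chain_sorted_of_nodup {l : List Int} (h : l.Nodup) :
    pvAdjDistinct (PySem.List.sorted l (fun x => x) false) = true := by
  rw [pvAdjDistinct_sorted_iff _ (PySem.List.sorted_pairwise l (fun x => x))]
  exact (List.Perm.nodup_iff (PySem.List.sorted_perm l (fun x => x) false)).mpr h

-- B = true ↔ the positions list is Nodup
theorem alt_iff (sequence : List Int) :
    balls_dont_collide_py_alt sequence = true ↔
      ((PySem.List.enumerate sequence 0).map
        (fun p => PySem.Int.mod (p.2 + p.1) (sequence.length : Int))).Nodup := by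
  unfold balls_dont_collide_py_alt
  constructor
  · exact nodup_of_chain_sorted
  · exact chain_sorted_of_nodup

-- A side: characterisation of the loop
theorem pvLoopA_iff (period : Int) (hpos : 0 < period) :
    ∀ (pairs : List (Int × Int)) (taken : List Bool),
      (taken.length : Int) = period →
      (pvLoopA period pairs taken = true ↔
        ((pairs.map (fun p => PySem.Int.mod (p.2 + p.1) period)).Nodup ∧
         ∀ c ∈ pairs.map (fun p => PySem.Int.mod (p.2 + p.1) period),
           taken.getD c.toNat false = false)) := by
  intro pairs
  induction pairs with
  | nil => intro taken _; simp [pvLoopA]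
  | cons p rest ih =>
    intro taken hlen
    obtain ⟨i, x⟩ := p
    have h0 : 0 ≤ PySem.Int.mod (x + i) period := PySem.Int.mod_nonneg _ hpos
    have h1 : PySem.Int.mod (x + i) period < period := PySem.Int.mod_lt _ hpos
    set c := PySem.Int.mod (x + i) period with hc
    have hclt : c.toNat < taken.length := by omega
    have hget : PySem.List.pyGet? taken c = some taken[c.toNat] := by
      have := PySem.List.pyGet?_of_nonneg (xs := taken) (i := c) h0
      rw [this, List.getElem?_eq_getElem hclt]
    have hrange : ∀ d ∈ List.map (fun p => PySem.Int.mod (p.2 + p.1) period) rest,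
        0 ≤ d ∧ d < period := by
      intro d hd
      simp only [List.mem_map] at hd
      obtain ⟨q, _, rfl⟩ := hd
      exact ⟨PySem.Int.mod_nonneg _ hpos, PySem.Int.mod_lt _ hpos⟩
    simp only [pvLoopA]
    rw [← hc]
    simp only [hget, List.map_cons, List.nodup_cons, List.mem_cons]
    by_cases hb : taken[c.toNat] = true
    · simp only [hb, if_true]
      constructor
      · intro h; exact absurd h (by simp)
      · rintro ⟨hnd, hall⟩
        have := hall c (Or.inl rfl)
        rw [List.getD_eq_getElem _ _ hclt] at this
        simp [hb] at this
    · simp only [hb, Bool.false_eq_true, if_false]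
      have hset : PySem.List.pySetD taken c true = taken.set c.toNat true :=
        PySem.List.pySetD_of_nonneg (xs := taken) (v := true) h0
      rw [hset, ih (taken.set c.toNat true) (by simp [hlen])]
      constructor
      · rintro ⟨hnd, hall⟩
        refine ⟨⟨?_, hnd⟩, ?_⟩
        · intro hmem
          have := hall c hmem
          rw [List.getD_eq_getElem _ _ (by simpa using hclt)] at this
          simp at this
        · intro d hd
          rcases hd with rfl | hd
          · rw [List.getD_eq_getElem _ _ hclt]; simpa using hb
          · obtain ⟨hd0, hdlt⟩ := hrange d hd
            have hdl : d.toNat < taken.length := by omega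
            have := hall d hd
            rw [List.getD_eq_getElem _ _ (by simpa using hdl)] at this
            rw [List.getD_eq_getElem _ _ hdl]
            by_cases hdc : d.toNat = c.toNat
            · exfalso
              simp only [List.getElem_set, hdc] at this
              simp at this
            · rw [List.getElem_set_ne (by omega)] at this
              exact this
      · rintro ⟨⟨hnotin, hnd⟩, hall⟩
        refine ⟨hnd, ?_⟩
        intro d hd
        obtain ⟨hd0, hdlt⟩ := hrange d hd
        have hdl : d.toNat < taken.length := by omega
        have hdne : d ≠ c := by rintro rfl; exact hnotin hd
        have hdall := hall d (Or.inr hd)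
        rw [List.getD_eq_getElem _ _ hdl] at hdall
        rw [List.getD_eq_getElem _ _ (by simpa using hdl)]
        rw [List.getElem_set_ne (by intro hh; exact hdne (by omega))]
        exact hdall

theorem a_iff (sequence : List Int) (hne : sequence ≠ []) :
    balls_dont_collide_py sequence = true ↔
      ((PySem.List.enumerate sequence 0).map
        (fun p => PySem.Int.mod (p.2 + p.1) (sequence.length : Int))).Nodup := by
  unfold balls_dont_collide_py
  have hpos : (0 : Int) < sequence.length := by
    have : sequence.length ≠ 0 := by simpa using (List.length_eq_zero_iff.ne.mpr hne)
    omega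
  rw [pvLoopA_iff _ hpos _ (List.replicate sequence.length false) (by simp)]
  constructor
  · exact fun h => h.1
  · intro h
    refine ⟨h, ?_⟩
    intro c _
    by_cases hcr : c.toNat < sequence.length
    · rw [List.getD_eq_getElem _ _ (by simpa using hcr)]; simp
    · rw [List.getD_eq_default _ _ (by simpa using hcr)]

-- ===== VERDICT (by name: the statement is the Claim_ definition above) =====
theorem balls_dont_collide_py_spec : Claim_equal_balls_dont_collide_py := by
  intro sequence _
  unfold Spec_balls_dont_collide_py
  rcases eq_or_ne sequence [] with rfl | hne
  · decide
  · rw [Bool.eq_iff_iff, a_iff sequence hne, alt_iff sequence]
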